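-- pv_equiv track=rewrite | github.com/adityavr9/IP | IPclass.py | powerEff
-- ===== SOURCE A (Python) =====
-- def powerEff(x, n, p=1):
--     if n == 0:
--         return p
--     elif n == 1:
--         return x * p
--     elif n % 2 == 0:
--         return powerEff(x ** 2, n // 2, p)
--     else:
--         return powerEff(x ** 2, n // 2, p * x)
-- ===== SOURCE B (Python) =====
-- def powerEff(x, n, p=1):
--     result = p
--     base = x
--     while n > 0:
--         if n % 2 == 1:
--             result = result * base
--         base = base * base
--         n //= 2
--     return result
-- ===== Notes on version B (the rewrite author's own statement) =====
-- stated objective: idiomatic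
-- what changed: Recursive square-and-multiply rewritten as an iterative while-loop maintaining a running result and squared base.
import Mathlib
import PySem

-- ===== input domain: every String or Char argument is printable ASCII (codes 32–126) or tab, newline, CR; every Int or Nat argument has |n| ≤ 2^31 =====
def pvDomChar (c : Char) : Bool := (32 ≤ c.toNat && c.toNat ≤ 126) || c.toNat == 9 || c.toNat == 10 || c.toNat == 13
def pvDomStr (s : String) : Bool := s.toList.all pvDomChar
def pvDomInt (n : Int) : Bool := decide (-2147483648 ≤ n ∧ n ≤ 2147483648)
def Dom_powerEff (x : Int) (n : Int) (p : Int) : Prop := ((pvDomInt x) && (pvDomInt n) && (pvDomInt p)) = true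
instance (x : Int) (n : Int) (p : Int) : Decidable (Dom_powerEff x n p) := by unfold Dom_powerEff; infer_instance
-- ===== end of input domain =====

-- B replaces A's recursive square-and-multiply with an iterative while-loop (result/base accumulators); same O(log n) cost.


-- ===== PORT A =====
-- Literal port of A. The 'n < 0' branch only makes the recursion total in Lean:
-- Python A never returns there (it recurses forever), and Pre_ excludes it.
def powerEff (x : Int) (n : Int) (p : Int) : Int :=
  if n = 0 then p
  else if n = 1 then x * p
  else if n < 0 then p  -- totality guard, outside Pre_
  else if PySem.Int.mod n 2 = 0 then powerEff (x ^ 2) (PySem.Int.floordiv n 2) p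
  else powerEff (x ^ 2) (PySem.Int.floordiv n 2) (p * x)
termination_by n.toNat
decreasing_by
  all_goals
    rw [PySem.Int.floordiv_eq_ediv_of_pos (by omega : (0:Int) < 2)]
    omega

-- ===== PORT B =====
-- the while-loop of Source B: state (result, base, n)
def powerEffLoop (result : Int) (base : Int) (n : Int) : Int :=
  if 0 < n then
    powerEffLoop (if PySem.Int.mod n 2 = 1 then result * base else result)
      (base * base) (PySem.Int.floordiv n 2)
  else result
termination_by n.toNat
decreasing_by
  rw [PySem.Int.floordiv_eq_ediv_of_pos (by omega : (0:Int) < 2)]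
  omega

def powerEff_alt (x : Int) (n : Int) (p : Int) : Int :=
  powerEffLoop p x n

-- ===== PRECONDITION & SPEC =====
-- Pre_ excludes n < 0, on which Python A never returns (unbounded recursion: n // 2 is -1 forever).
def Pre_powerEff (x : Int) (n : Int) (p : Int) : Prop := 0 ≤ n
instance (x : Int) (n : Int) (p : Int) : Decidable (Pre_powerEff x n p) := by unfold Pre_powerEff; infer_instance
def pvWitness_powerEff : Int × Int × Int := (3, 10, 2)

def Spec_powerEff (x : Int) (n : Int) (p : Int) (out : Int) : Prop := out = powerEff_alt x n p
instance (x : Int) (n : Int) (p : Int) (out : Int) : Decidable (Spec_powerEff x n p out) := by unfold Spec_powerEff; infer_instance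

-- ===== CLAIM (what is proved, stated in full; the proofs are below) =====
def Claim_equal_powerEff : Prop := ∀ (x : Int) (n : Int) (p : Int), Dom_powerEff x n p → Pre_powerEff x n p → Spec_powerEff x n p (powerEff x n p)

-- ===== LEMMAS AND PROOFS =====

-- Both programs compute p * x ^ n (for 0 ≤ n); we prove each equal to that closed form.

theorem powerEff_closed (k : Nat) : ∀ (x n p : Int), 0 ≤ n → n.toNat ≤ k →
    powerEff x n p = p * x ^ n.toNat := by
  induction k with
  | zero =>
    intro x n p hn hk
    have : n = 0 := by omega
    subst this
    simp [powerEff]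
  | succ k ih =>
    intro x n p hn hk
    rw [powerEff]
    rcases eq_or_ne n 0 with h0 | h0
    · subst h0; simp
    · rcases eq_or_ne n 1 with h1 | h1
      · subst h1; simp [mul_comm]
      · have hpos : (0:Int) < 2 := by omega
        have hfd : PySem.Int.floordiv n 2 = n / 2 :=
          PySem.Int.floordiv_eq_ediv_of_pos hpos
        have hmd : PySem.Int.mod n 2 = n % 2 :=
          PySem.Int.mod_eq_emod_of_pos hpos
        have hn2 : (0:Int) ≤ n / 2 := by omega
        have hle : (n / 2).toNat ≤ k := by omega
        have hnlt : ¬ n < 0 := by omega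
        have hsplit : n.toNat = 2 * (n / 2).toNat + (n % 2).toNat := by omega
        rcases Int.emod_two_eq_zero_or_one n with he | he
        · simp only [if_neg h0, if_neg h1, if_neg hnlt, hmd, hfd, he]
          rw [ih (x ^ 2) (n / 2) p hn2 hle]
          rw [← pow_mul, hsplit, he]
          simp
        · have : ¬ (n % 2 = 0) := by omega
          simp only [if_neg h0, if_neg h1, if_neg hnlt, hmd, hfd, if_neg this]
          rw [ih (x ^ 2) (n / 2) (p * x) hn2 hle]
          rw [← pow_mul, hsplit, he]
          simp only [Int.toNat_one]
          ring

theorem powerEffLoop_closed (k : Nat) : ∀ (r b n : Int), 0 ≤ n → n.toNat ≤ k →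
    powerEffLoop r b n = r * b ^ n.toNat := by
  induction k with
  | zero =>
    intro r b n hn hk
    have : n = 0 := by omega
    rw [powerEffLoop]
    simp [this]
  | succ k ih =>
    intro r b n hn hk
    rw [powerEffLoop]
    rcases eq_or_ne n 0 with h0 | h0
    · simp [h0]
    · have hnpos : 0 < n := by omega
      have hpos : (0:Int) < 2 := by omega
      have hfd : PySem.Int.floordiv n 2 = n / 2 :=
        PySem.Int.floordiv_eq_ediv_of_pos hpos
      have hmd : PySem.Int.mod n 2 = n % 2 :=
        PySem.Int.mod_eq_emod_of_pos hpos
      have hn2 : (0:Int) ≤ n / 2 := by omega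
      have hle : (n / 2).toNat ≤ k := by omega
      have hsplit : n.toNat = 2 * (n / 2).toNat + (n % 2).toNat := by omega
      rw [if_pos hnpos, hfd, hmd]
      rcases Int.emod_two_eq_zero_or_one n with he | he
      · have : ¬ (n % 2 = 1) := by omega
        rw [if_neg this, ih r (b * b) (n / 2) hn2 hle]
        rw [hsplit, he, ← pow_two, ← pow_mul]
        simp
      · rw [if_pos he, ih (r * b) (b * b) (n / 2) hn2 hle]
        rw [hsplit, he, ← pow_two, ← pow_mul]
        simp only [Int.toNat_one]
        ring

-- ===== VERDICT (by name: the statement is the Claim_ definition above) =====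
theorem powerEff_spec : Claim_equal_powerEff := by
  intro x n p _ hpre
  unfold Spec_powerEff powerEff_alt
  rw [powerEff_closed n.toNat x n p hpre le_rfl,
      powerEffLoop_closed n.toNat p x n hpre le_rfl]
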